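-- pv_equiv track=rewrite | github.com/hankcht/ARIANNA-code | model_runners/R04_VAE_train_and_run.py | _sanitize_label_for_filename
-- ===== SOURCE A (Python) =====
-- def _sanitize_label_for_filename(label):
--     """Return a filesystem-friendly string derived from a label."""
--
--     safe_chars = set("abcdefghijklmnopqrstuvwxyz0123456789-_")
--     sanitized = ''.join(
--         ch_lower if (ch_lower := ch.lower()) in safe_chars else '_' for ch in label
--     )
--     while '__' in sanitized:
--         sanitized = sanitized.replace('__', '_')
--     return sanitized.strip('_') or 'label'
-- ===== SOURCE B (Python) =====
-- def _sanitize_label_for_filename(label):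
--     """Return a filesystem-friendly string derived from a label."""
--
--     safe_chars = set("abcdefghijklmnopqrstuvwxyz0123456789-_")
--     parts = []
--     prev_underscore = False
--     for ch in label:
--         low = ch.lower()
--         out = low if low in safe_chars else '_'
--         if out == '_':
--             if not prev_underscore:
--                 parts.append('_')
--                 prev_underscore = True
--         else:
--             parts.append(out)
--             prev_underscore = False
--     return ''.join(parts).strip('_') or 'label'
-- ===== Notes on version B (the rewrite author's own statement) =====
-- stated objective: alternative
-- what changed: B builds the sanitized name in one streaming pass with a last-emitted-underscore flag so runs collapse during the walk, instead of A's map over the string followed by a while-loop of repeated '__'->'_' replace passes.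
import Mathlib
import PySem

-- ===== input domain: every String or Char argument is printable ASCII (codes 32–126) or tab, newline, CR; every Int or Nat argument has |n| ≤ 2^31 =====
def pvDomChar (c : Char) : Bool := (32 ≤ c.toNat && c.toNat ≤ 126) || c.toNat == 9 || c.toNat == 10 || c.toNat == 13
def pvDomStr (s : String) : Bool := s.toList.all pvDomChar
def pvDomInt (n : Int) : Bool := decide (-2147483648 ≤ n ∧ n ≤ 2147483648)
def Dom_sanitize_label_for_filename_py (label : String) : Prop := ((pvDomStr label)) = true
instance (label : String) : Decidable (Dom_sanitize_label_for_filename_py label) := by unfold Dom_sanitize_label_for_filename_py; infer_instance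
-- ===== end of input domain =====

-- B rebuilds the sanitized name in one streaming pass (skip '_' after an emitted '_')
-- instead of A's map + repeated '__'→'_' replace passes: same result, different decomposition.

-- ===== PORT A =====
-- rep2 describes ONE pass of s.replace('__','_'); it exists only to justify
-- termination of the while-loop port collapseA (cited in its decreasing_by).
def rep2 : List Char → List Char
  | [] => []
  | '_' :: '_' :: t => '_' :: rep2 t
  | c :: t => c :: rep2 t

theorem rep2_length_le (t : List Char) : (rep2 t).length ≤ t.length := by
  induction t using rep2.induct <;> simp [rep2] <;> omega

theorem rep2_dd (t : List Char) : rep2 ('_' :: '_' :: t) = '_' :: rep2 t := rfl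

theorem rep2_cons (c : Char) (t : List Char) (h : ¬(c = '_' ∧ t.head? = some '_')) :
    rep2 (c :: t) = c :: rep2 t := by
  rw [rep2.eq_def]
  split <;> simp_all

theorem go_eq_rep2 (fuel : Nat) (l acc : List Char) (h : l.length ≤ fuel) :
    PySem.Chars.replace.go ['_', '_'] ['_'] fuel l acc = acc.reverse ++ rep2 l := by
  induction fuel generalizing l acc with
  | zero =>
    cases l with
    | nil => simp [PySem.Chars.replace.go, rep2]
    | cons c t => simp at h
  | succ n ih =>
    cases l with
    | nil => simp [PySem.Chars.replace.go, rep2]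
    | cons c t =>
      by_cases hp : List.isPrefixOf ['_', '_'] (c :: t) = true
      · cases t with
        | nil => simp [List.isPrefixOf] at hp
        | cons b u =>
          simp [List.isPrefixOf] at hp
          obtain ⟨hc, hb⟩ := hp
          subst hc; subst hb
          rw [PySem.Chars.replace.go]
          rw [if_pos (by simp [List.isPrefixOf])]
          have h' : u.length ≤ n := by simp at h; omega
          rw [show List.drop (['_','_'] : List Char).length ('_' :: '_' :: u) = u by simp]
          rw [ih u (['_'].reverse ++ acc) h']
          rw [rep2_dd]
          simp
      · rw [PySem.Chars.replace.go]
        rw [if_neg (by simp [hp])]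
        have h' : t.length ≤ n := by simp at h; omega
        rw [ih t (c :: acc) h']
        rw [rep2_cons c t (by
          rintro ⟨rfl, hh⟩
          cases t with
          | nil => simp at hh
          | cons b u =>
            simp at hh
            subst hh
            simp [List.isPrefixOf] at hp)]
        simp

theorem replace_eq_rep2 (cs : List Char) :
    PySem.Chars.replace cs ['_', '_'] ['_'] = rep2 cs := by
  rw [PySem.Chars.replace]
  simp only [List.isEmpty_cons, Bool.false_eq_true, if_neg, not_false_eq_true]
  exact go_eq_rep2 cs.length cs [] le_rfl

theorem rep2_length_lt : ∀ cs : List Char, (['_', '_'] : List Char) <:+: cs → (rep2 cs).length < cs.length := by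
  intro cs
  induction cs using rep2.induct with
  | case1 => intro h; simp at h
  | case2 t ih =>
    intro _
    have := rep2_length_le t
    rw [rep2_dd]
    simp; omega
  | case3 c t hne ih =>
    intro h
    rw [rep2_cons c t (by
      rintro ⟨rfl, hh⟩
      cases t with
      | nil => simp at hh
      | cons b u => simp at hh; exact hne u rfl (by simp [hh]))]
    rcases List.infix_cons_iff.mp h with hpre | hinf
    · exfalso
      obtain ⟨r, hr⟩ := hpre
      cases t with
      | nil => have := congrArg List.length hr; simp at this
      | cons b u =>
        simp at hr
        exact hne u hr.1.symm (by simp [hr.2.1.symm])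
    · have := ih hinf
      simp; omega

theorem replace_length_lt (cs : List Char)
    (h : PySem.Chars.isIn ['_', '_'] cs = true) :
    (PySem.Chars.replace cs ['_', '_'] ['_']).length < cs.length := by
  rw [replace_eq_rep2]
  exact rep2_length_lt cs ((PySem.Chars.isIn_iff_infix _ _).mp h)

-- while '__' in sanitized: sanitized = sanitized.replace('__', '_')
def collapseA (cs : List Char) : List Char :=
  if h : PySem.Chars.isIn ['_', '_'] cs = true then
    collapseA (PySem.Chars.replace cs ['_', '_'] ['_'])
  else cs
termination_by cs.length
decreasing_by exact replace_length_lt cs h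

def sanitize_label_for_filename_py (label : String) : String :=
  let safe_chars := PySem.Set.ofList "abcdefghijklmnopqrstuvwxyz0123456789-_".toList
  let sanitized := label.toList.map (fun ch =>
    let ch_lower := PySem.Chars.lowerChar ch
    if PySem.Set.contains safe_chars ch_lower then ch_lower else '_')
  let collapsed := collapseA sanitized
  let stripped := PySem.Chars.stripChars collapsed ['_']
  if stripped.isEmpty then "label" else String.mk stripped

-- ===== PORT B =====
def sanitize_label_for_filename_py_alt (label : String) : String :=
  let safe_chars := PySem.Set.ofList "abcdefghijklmnopqrstuvwxyz0123456789-_".toList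
  let st := label.toList.foldl (fun (st : List Char × Bool) ch =>
    let low := PySem.Chars.lowerChar ch
    let out := if PySem.Set.contains safe_chars low then low else '_'
    if out = '_' then
      if st.2 then st else (st.1 ++ ['_'], true)
    else (st.1 ++ [out], false)) ([], false)
  let stripped := PySem.Chars.stripChars st.1 ['_']
  if stripped.isEmpty then "label" else String.mk stripped

-- ===== PRECONDITION & SPEC =====
def Spec_sanitize_label_for_filename_py (label : String) (out : String) : Prop := out = sanitize_label_for_filename_py_alt label
instance (label : String) (out : String) : Decidable (Spec_sanitize_label_for_filename_py label out) := by unfold Spec_sanitize_label_for_filename_py; infer_instance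

-- ===== CLAIM (what is proved, stated in full; the proofs are below) =====
def Claim_equal_sanitize_label_for_filename_py : Prop := ∀ (label : String), Dom_sanitize_label_for_filename_py label → Spec_sanitize_label_for_filename_py label (sanitize_label_for_filename_py label)

-- ===== LEMMAS AND PROOFS =====

-- squeeze runs of '_' to one; prev = "an underscore was just emitted"
def sqz : Bool → List Char → List Char
  | _, [] => []
  | prev, c :: t =>
      if c = '_' then (if prev then sqz true t else '_' :: sqz true t)
      else c :: sqz false t

theorem sqz_rep2 (t : List Char) : ∀ prev, sqz prev (rep2 t) = sqz prev t := by
  induction t using rep2.induct with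
  | case1 => intro prev; rfl
  | case2 u ih =>
    intro prev
    rw [rep2_dd]
    cases prev <;> simp [sqz, ih]
  | case3 c u hne ih =>
    intro prev
    rw [rep2_cons c u (by
      rintro ⟨rfl, hh⟩
      cases u with
      | nil => simp at hh
      | cons b v => simp at hh; exact hne v rfl (by simp [hh]))]
    by_cases hc : c = '_' <;> cases prev <;> simp [sqz, hc, ih]

theorem sqz_no_dd (cs : List Char) (h : ¬ (['_', '_'] <:+: cs)) :
    sqz false cs = cs ∧ (cs.head? ≠ some '_' → sqz true cs = cs) := by
  induction cs with
  | nil => simp [sqz]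
  | cons c t ih =>
    have ht : ¬ (['_', '_'] <:+: t) := fun hi => h (List.infix_cons_iff.mpr (Or.inr hi))
    obtain ⟨ih1, ih2⟩ := ih ht
    by_cases hc : c = '_'
    · subst hc
      have hhd : t.head? ≠ some '_' := by
        intro hh
        cases t with
        | nil => simp at hh
        | cons b u =>
          simp at hh; subst hh
          exact h (List.infix_cons_iff.mpr (Or.inl ⟨u, rfl⟩))
      constructor
      · simp [sqz, ih2 hhd]
      · simp
    · constructor
      · simp [sqz, hc, ih1]
      · intro _; simp [sqz, hc, ih1]

theorem collapseA_eq_sq (cs : List Char) : collapseA cs = sqz false cs := by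
  induction cs using collapseA.induct with
  | case1 cs h ih =>
    rw [collapseA]
    simp only [h, dif_pos]
    rw [ih, replace_eq_rep2, sqz_rep2]
  | case2 cs h =>
    rw [collapseA]
    simp only [h]
    have h' : ¬ (['_', '_'] <:+: cs) := fun hi => h ((PySem.Chars.isIn_iff_infix _ _).mpr hi)
    exact ((sqz_no_dd cs h').1).symm

def gB (st : List Char × Bool) (c : Char) : List Char × Bool :=
  if c = '_' then
    if st.2 then st else (st.1 ++ ['_'], true)
  else (st.1 ++ [c], false)

theorem foldl_gB (ms : List Char) : ∀ (acc : List Char) (prev : Bool),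
    (ms.foldl gB (acc, prev)).1 = acc ++ sqz prev ms := by
  induction ms with
  | nil => intro acc prev; simp [sqz]
  | cons c t ih =>
    intro acc prev
    by_cases hc : c = '_'
    · subst hc
      cases prev <;> simp [gB, sqz, ih]
    · simp [gB, sqz, hc, ih]

theorem foldB_eq (label : String) :
    (label.toList.foldl (fun (st : List Char × Bool) ch =>
      let low := PySem.Chars.lowerChar ch
      let out := if PySem.Set.contains (PySem.Set.ofList "abcdefghijklmnopqrstuvwxyz0123456789-_".toList) low then low else '_'
      if out = '_' then
        if st.2 then st else (st.1 ++ ['_'], true)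
      else (st.1 ++ [out], false)) ([], false)).1
    = sqz false (label.toList.map (fun ch =>
        let ch_lower := PySem.Chars.lowerChar ch
        if PySem.Set.contains (PySem.Set.ofList "abcdefghijklmnopqrstuvwxyz0123456789-_".toList) ch_lower then ch_lower else '_')) := by
  have h := foldl_gB (label.toList.map (fun ch =>
        let ch_lower := PySem.Chars.lowerChar ch
        if PySem.Set.contains (PySem.Set.ofList "abcdefghijklmnopqrstuvwxyz0123456789-_".toList) ch_lower then ch_lower else '_')) [] false
  rw [List.foldl_map] at h
  simpa [gB] using h

-- ===== VERDICT (by name: the statement is the Claim_ definition above) =====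
theorem sanitize_label_for_filename_py_spec : Claim_equal_sanitize_label_for_filename_py := by
  intro label _
  unfold Spec_sanitize_label_for_filename_py
  unfold sanitize_label_for_filename_py sanitize_label_for_filename_py_alt
  simp only
  rw [collapseA_eq_sq, ← foldB_eq label]
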